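-- pv_equiv track=rewrite | github.com/simmonsmoreno/elastic-optical-network | unicv-version/components/light_path_control.py | checkSlotsBestGap
-- ===== SOURCE A (Python) =====
-- def checkSlotsBestGap(n_slot, lista):
--     index = []
--     sublist = []
--     for i in range(len(lista)):
--         try:
--             if lista[i] + 1 == lista[i + 1]:
--                 index.append(lista[i])
--                 if i + 1 == len(lista) - 1:
--                     index.append(lista[i + 1])
--             else:
--                 if lista[i - 1] == lista[i] - 1:
--                     index.append(lista[i])
--                 if len(index) >= n_slot:
--                     sublist.append(index)
--                 index = []
--         except:
--             if len(index) >= n_slot: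
--                 sublist.append(index)
--
--     if sublist:
--         while True:
--             for lista2 in sublist:
--                 if len(lista2) == n_slot:
--                     return lista2
--             n_slot += 1
--     else:
--         return []
-- ===== SOURCE B (Python) =====
-- def checkSlotsBestGap(n_slot, lista):
--     # one pass: group into maximal consecutive runs, then keep the first
--     # shortest run of length >= n_slot
--     runs = []
--     cur = []
--     for x in lista:
--         if cur and cur[-1] + 1 == x:
--             cur.append(x)
--         else:
--             if cur:
--                 runs.append(cur)
--             cur = [x]
--     if cur:
--         runs.append(cur)
--     best = None
--     for r in runs:
--         if len(r) >= n_slot and (best is None or len(r) < len(best)):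
--             best = r
--     return best if best is not None else []
-- ===== Notes on version B (the rewrite author's own statement) =====
-- stated objective: alternative
-- what changed: A records candidate runs with an index loop full of neighbour lookups and then retries a scan of the recorded list with a growing target length (while True / n_slot += 1); B makes one grouping pass into maximal consecutive runs and one min-scan that keeps the first shortest run of length >= n_slot (same measured cost, different algorithm).
-- intended difference: On n_slot = 1 with a list containing an isolated slot (no consecutive neighbour on either side, outside the wraparound case lista[-1] == lista[0]-1), A returns [] or a longer run because its scan can never record a 1-slot gap, while B returns that single slot, the intended best gap for a 1-slot request. — e.g. on checkSlotsBestGap(1, [5]): A returns [], B returns [5]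
-- outside the precondition, e.g. on checkSlotsBestGap(0, [1, 2, 9]): A returns [], B returns [9]; on checkSlotsBestGap(-1, [3, 7]): A returns [], B returns [3]
import Mathlib
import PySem

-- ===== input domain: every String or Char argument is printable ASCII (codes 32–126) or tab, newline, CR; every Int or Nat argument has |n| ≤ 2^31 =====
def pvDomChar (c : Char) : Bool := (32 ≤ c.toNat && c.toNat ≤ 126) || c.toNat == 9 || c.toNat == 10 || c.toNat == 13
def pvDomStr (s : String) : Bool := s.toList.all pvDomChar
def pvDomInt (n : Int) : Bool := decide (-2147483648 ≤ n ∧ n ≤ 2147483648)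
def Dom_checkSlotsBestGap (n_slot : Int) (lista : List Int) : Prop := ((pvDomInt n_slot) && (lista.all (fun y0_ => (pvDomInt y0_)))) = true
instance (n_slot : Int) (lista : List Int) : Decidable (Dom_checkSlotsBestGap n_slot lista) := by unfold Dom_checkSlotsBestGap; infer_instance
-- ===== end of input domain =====

-- B replaces A's record-then-retry scan (index loop + while that re-scans the recorded
-- gaps with a growing target) by one grouping pass into maximal runs plus one min-scan.

-- ===== PORT A =====
-- every index A uses is in range when read (i ∈ range(len); i-1 ≥ -1 wraps; i+1 is guarded
-- or raises into the except), so the .getD 0 default is never the value used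
def pvGetA (lista : List Int) (j : Int) : Int := (PySem.List.pyGet? lista j).getD 0

-- body of A's `for i in range(len(lista))`, state = (index, sublist)
def pvStepA (n_slot : Int) (lista : List Int) (st : List Int × List (List Int)) (i : Nat) :
    List Int × List (List Int) :=
  if (i : Int) + 1 < (lista.length : Int) then
    -- try body runs without IndexError
    if pvGetA lista i + 1 = pvGetA lista ((i : Int) + 1) then
      let index := st.1 ++ [pvGetA lista i]
      let index := if (i : Int) + 1 = (lista.length : Int) - 1 then index ++ [pvGetA lista ((i : Int) + 1)] else index
      (index, st.2)
    else
      let index := if pvGetA lista ((i : Int) - 1) = pvGetA lista i - 1 then st.1 ++ [pvGetA lista i] else st.1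
      ([], if n_slot ≤ (index.length : Int) then st.2 ++ [index] else st.2)
  else
    -- lista[i+1] raises IndexError → except branch
    (st.1, if n_slot ≤ (st.1.length : Int) then st.2 ++ [st.1] else st.2)

-- A's `while True: for lista2 in sublist: …; n_slot += 1`; fuel is only a termination
-- witness (the Python loop stops at the minimum recorded length, which the fuel exceeds)
def pvWhileA : Nat → Int → List (List Int) → List Int
  | 0, _, _ => []
  | fuel + 1, k, sub =>
    match sub.find? (fun l => (l.length : Int) == k) with
    | some r => r
    | none => pvWhileA fuel (k + 1) sub

def checkSlotsBestGap (n_slot : Int) (lista : List Int) : List Int :=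
  let sublist := ((List.range lista.length).foldl (pvStepA n_slot lista) ([], [])).2
  if sublist.isEmpty then []
  else
    pvWhileA ((((sublist.foldl (fun m r => max m r.length) 0 : Nat) : Int) + 1 - n_slot).toNat + 1) n_slot sublist

-- ===== PORT B =====
-- Source B's grouping loop, state = (runs, cur)
def pvGroupStep (st : List (List Int) × List Int) (x : Int) : List (List Int) × List Int :=
  match st.2.getLast? with
  | some a => if a + 1 = x then (st.1, st.2 ++ [x]) else (st.1 ++ [st.2], [x])
  | none => (st.1, [x])

def pvRunsOf (lista : List Int) : List (List Int) :=
  let st := lista.foldl pvGroupStep ([], [])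
  if st.2.isEmpty then st.1 else st.1 ++ [st.2]

-- Source B's best-scan loop
def pvBestStep (n_slot : Int) (best : Option (List Int)) (r : List Int) : Option (List Int) :=
  if n_slot ≤ (r.length : Int) then
    match best with
    | none => some r
    | some b => if r.length < b.length then some r else best
  else best

def checkSlotsBestGap_alt (n_slot : Int) (lista : List Int) : List Int :=
  (((pvRunsOf lista).foldl (pvBestStep n_slot) none).getD [])

-- ===== PRECONDITION & SPEC =====
-- Pre_ excludes non-positive n_slot (a degenerate request for ≤ 0 slots): there A's answer
-- hinges on accidental appends of the empty scratch list `index` (A returns [] whenever the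
-- slot list has an isolated slot), a corner no caller would specify; B reports the shortest
-- run as everywhere else.
def Pre_checkSlotsBestGap (n_slot : Int) (lista : List Int) : Prop := 1 ≤ n_slot
instance (n_slot : Int) (lista : List Int) : Decidable (Pre_checkSlotsBestGap n_slot lista) := by
  unfold Pre_checkSlotsBestGap; infer_instance

def pvWitness_checkSlotsBestGap : Int × List Int := (2, [1, 2, 3])

-- On n_slot = 1 with a list containing an isolated slot (an index i with no consecutive
-- neighbour on either side, outside the wraparound case lista[-1] == lista[0]-1), A returns
-- [] or a longer run because its scan can never record a 1-slot gap, while B returns that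
-- single slot — the intended best gap for a 1-slot request.
def D_checkSlotsBestGap (n_slot : Int) (lista : List Int) : Prop :=
  n_slot = 1 ∧
  ¬ (lista.getLast? = some (lista.getD 0 0 - 1) ∧ lista.getD 0 0 + 1 ≠ lista.getD 1 0 ∧
      2 ≤ lista.length) ∧
  ∃ i < lista.length, (i = 0 ∨ lista.getD (i - 1) 0 + 1 ≠ lista.getD i 0) ∧
    (i = lista.length - 1 ∨ lista.getD i 0 + 1 ≠ lista.getD (i + 1) 0)
instance (n_slot : Int) (lista : List Int) : Decidable (D_checkSlotsBestGap n_slot lista) := by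
  unfold D_checkSlotsBestGap; infer_instance

def Spec_checkSlotsBestGap (n_slot : Int) (lista : List Int) (out : List Int) : Prop :=
  ¬ D_checkSlotsBestGap n_slot lista → out = checkSlotsBestGap_alt n_slot lista
instance (n_slot : Int) (lista : List Int) (out : List Int) : Decidable (Spec_checkSlotsBestGap n_slot lista out) := by
  unfold Spec_checkSlotsBestGap; infer_instance

def pvDiffWitness_checkSlotsBestGap : Int × List Int := (1, [5])
def pvDiffWitnessOut_checkSlotsBestGap : (List Int) × (List Int) := ([], [5])

-- ===== CLAIM =====
def Claim_unchanged_checkSlotsBestGap : Prop := ∀ (n_slot : Int) (lista : List Int), Dom_checkSlotsBestGap n_slot lista → Pre_checkSlotsBestGap n_slot lista → Spec_checkSlotsBestGap n_slot lista (checkSlotsBestGap n_slot lista)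
def Claim_exact_checkSlotsBestGap : Prop := ∀ (n_slot : Int) (lista : List Int), Dom_checkSlotsBestGap n_slot lista → Pre_checkSlotsBestGap n_slot lista → D_checkSlotsBestGap n_slot lista → checkSlotsBestGap n_slot lista ≠ checkSlotsBestGap_alt n_slot lista
def Claim_changed_checkSlotsBestGap : Prop := Dom_checkSlotsBestGap (pvDiffWitness_checkSlotsBestGap.1) (pvDiffWitness_checkSlotsBestGap.2) ∧ Pre_checkSlotsBestGap (pvDiffWitness_checkSlotsBestGap.1) (pvDiffWitness_checkSlotsBestGap.2) ∧ D_checkSlotsBestGap (pvDiffWitness_checkSlotsBestGap.1) (pvDiffWitness_checkSlotsBestGap.2) ∧ checkSlotsBestGap (pvDiffWitness_checkSlotsBestGap.1) (pvDiffWitness_checkSlotsBestGap.2) = pvDiffWitnessOut_checkSlotsBestGap.1 ∧ checkSlotsBestGap_alt (pvDiffWitness_checkSlotsBestGap.1) (pvDiffWitness_checkSlotsBestGap.2) = pvDiffWitnessOut_checkSlotsBestGap.2 ∧ pvDiffWitnessOut_checkSlotsBestGap.1 ≠ pvDiffWitnessOut_checkSlotsBestGap.2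

-- ===== LEMMAS AND PROOFS =====

-- closing B's grouping state, as Source B's trailing `if cur: runs.append(cur)` does
def pvFinish (st : List (List Int) × List Int) : List (List Int) :=
  if st.2.isEmpty then st.1 else st.1 ++ [st.2]

theorem getA_nat (lista : List Int) (i : Nat) (h : i < lista.length) :
    pvGetA lista i = lista[i] := by
  simp [pvGetA, PySem.List.pyGet?_natCast, List.getElem?_eq_getElem h]

theorem pvFinish_append (A B : List (List Int)) (c : List Int) :
    pvFinish (A ++ B, c) = A ++ pvFinish (B, c) := by
  unfold pvFinish
  by_cases h : c.isEmpty <;> simp [h]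

-- proof-side run scanner: does some maximal consecutive run (current last a, current run
-- has length 1 iff len1) have length 1?
def pvSingles (a : Int) (len1 : Bool) : List Int → Bool
  | [] => len1
  | x :: r => if a + 1 = x then pvSingles x false r else (len1 || pvSingles x true r)

-- a length-1 run found by the scanner yields an isolated index in D_'s sense
theorem singles_to_iso : ∀ (r : List Int) (a : Int) (len1 : Bool),
    pvSingles a len1 r = true →
    ∃ i, i < (a :: r).length ∧
      ((i = 0 ∧ len1 = true) ∨ (i ≠ 0 ∧ (a :: r).getD (i - 1) 0 + 1 ≠ (a :: r).getD i 0)) ∧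
      (i = (a :: r).length - 1 ∨ (a :: r).getD i 0 + 1 ≠ (a :: r).getD (i + 1) 0) := by
  intro r
  induction r with
  | nil =>
    intro a len1 h
    exact ⟨0, by simp, Or.inl ⟨rfl, by simpa [pvSingles] using h⟩, Or.inl (by simp)⟩
  | cons x r' ih =>
    intro a len1 h
    by_cases hax : a + 1 = x
    · have h' : pvSingles x false r' = true := by simpa [pvSingles, hax] using h
      obtain ⟨j, hj, hl, hr⟩ := ih x false h'
      rcases hl with ⟨_, hfalse⟩ | ⟨hj0, hbreak⟩
      · exact absurd hfalse (by simp)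
      obtain ⟨k, rfl⟩ : ∃ k, j = k + 1 := ⟨j - 1, by omega⟩
      refine ⟨k + 2, by simp at hj ⊢; omega, Or.inr ⟨by omega, ?_⟩, ?_⟩
      · simpa [List.getD_cons_succ] using hbreak
      · rcases hr with hr | hr
        · exact Or.inl (by simp at hr ⊢; omega)
        · exact Or.inr (by simpa [List.getD_cons_succ] using hr)
    · rcases (by simpa [pvSingles, hax] using h : len1 = true ∨ pvSingles x true r' = true)
        with h1 | h'
      · exact ⟨0, by simp, Or.inl ⟨rfl, h1⟩, Or.inr (by simpa using hax)⟩
      · obtain ⟨j, hj, hl, hr⟩ := ih x true h'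
        rcases hl with ⟨hj0, _⟩ | ⟨hj0, hbreak⟩
        · subst hj0
          refine ⟨1, by simp, Or.inr ⟨one_ne_zero, by simpa using hax⟩, ?_⟩
          rcases hr with hr | hr
          · refine Or.inl ?_
            have hr' : r'.length = 0 := by simpa using hr.symm
            simp [hr']
          · exact Or.inr (by simpa [List.getD_cons_succ] using hr)
        · obtain ⟨k, rfl⟩ : ∃ k, j = k + 1 := ⟨j - 1, by omega⟩
          refine ⟨k + 2, by simp at hj ⊢; omega, Or.inr ⟨by omega, ?_⟩, ?_⟩
          · simpa [List.getD_cons_succ] using hbreak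
          · rcases hr with hr | hr
            · exact Or.inl (by simp at hr ⊢; omega)
            · exact Or.inr (by simpa [List.getD_cons_succ] using hr)

-- exact unfoldings of A's loop body in its four reachable branch shapes
theorem stepA_except (n_slot : Int) (lista : List Int) (st : List Int × List (List Int)) (j : Nat)
    (h : ¬ ((j : Int) + 1 < (lista.length : Int))) :
    pvStepA n_slot lista st j
      = (st.1, if n_slot ≤ (st.1.length : Int) then st.2 ++ [st.1] else st.2) := by
  unfold pvStepA
  rw [if_neg h]

theorem stepA_ifbranch (n_slot : Int) (lista : List Int) (st : List Int × List (List Int)) (j : Nat)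
    (h1 : (j : Int) + 1 < (lista.length : Int))
    (h2 : pvGetA lista j + 1 = pvGetA lista ((j : Int) + 1)) :
    pvStepA n_slot lista st j
      = (if (j : Int) + 1 = (lista.length : Int) - 1
         then st.1 ++ [pvGetA lista j] ++ [pvGetA lista ((j : Int) + 1)]
         else st.1 ++ [pvGetA lista j], st.2) := by
  unfold pvStepA
  rw [if_pos h1, if_pos h2]

theorem stepA_else_join (n_slot : Int) (lista : List Int) (st : List Int × List (List Int)) (j : Nat)
    (h1 : (j : Int) + 1 < (lista.length : Int))
    (h2 : ¬ (pvGetA lista j + 1 = pvGetA lista ((j : Int) + 1)))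
    (hpc : pvGetA lista ((j : Int) - 1) = pvGetA lista j - 1) :
    pvStepA n_slot lista st j
      = ([], if n_slot ≤ ((st.1 ++ [pvGetA lista j]).length : Int)
             then st.2 ++ [st.1 ++ [pvGetA lista j]] else st.2) := by
  unfold pvStepA
  rw [if_pos h1, if_neg h2]
  simp only [if_pos hpc]

theorem stepA_else_fresh (n_slot : Int) (lista : List Int) (st : List Int × List (List Int)) (j : Nat)
    (h1 : (j : Int) + 1 < (lista.length : Int))
    (h2 : ¬ (pvGetA lista j + 1 = pvGetA lista ((j : Int) + 1)))
    (hpc : ¬ (pvGetA lista ((j : Int) - 1) = pvGetA lista j - 1)) :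
    pvStepA n_slot lista st j
      = ([], if n_slot ≤ (st.1.length : Int) then st.2 ++ [st.1] else st.2) := by
  unfold pvStepA
  rw [if_pos h1, if_neg h2]
  simp only [if_neg hpc]

-- a run already recorded in `runs` is only ever a passive prefix of the grouping fold
theorem grp_prefix (l : List Int) : ∀ (R S : List (List Int)) (cur : List Int),
    l.foldl pvGroupStep (R ++ S, cur)
      = (R ++ (l.foldl pvGroupStep (S, cur)).1, (l.foldl pvGroupStep (S, cur)).2) := by
  induction l with
  | nil => intro R S cur; simp
  | cons x l ih =>
    intro R S cur
    simp only [List.foldl_cons]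
    cases h : cur.getLast? with
    | none => simpa [pvGroupStep, h] using ih R S [x]
    | some a =>
      by_cases hx : a + 1 = x
      · simpa [pvGroupStep, h, hx] using ih R S (cur ++ [x])
      · simpa [pvGroupStep, h, hx, List.append_assoc] using ih R (S ++ [cur]) [x]

theorem runsOf_break (x0 x1 : Int) (r : List Int) (h : x0 + 1 ≠ x1) :
    pvRunsOf (x0 :: x1 :: r) = [x0] :: pvRunsOf (x1 :: r) := by
  have h2 : (r.foldl pvGroupStep ([[x0]], [x1]))
      = ([[x0]] ++ (r.foldl pvGroupStep ([], [x1])).1, (r.foldl pvGroupStep ([], [x1])).2) := by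
    simpa using grp_prefix r [[x0]] [] [x1]
  simp only [pvRunsOf, List.foldl_cons, pvGroupStep, List.getLast?_nil, List.getLast?_singleton,
    if_neg h, List.nil_append, h2]
  by_cases hc : (r.foldl pvGroupStep ([], [x1])).2.isEmpty <;> simp [hc]

-- all closed runs are nonempty
theorem runs_ne_nil (l : List Int) : ∀ (R : List (List Int)) (cur : List Int),
    (∀ r ∈ R, r ≠ []) → ∀ r ∈ pvFinish (l.foldl pvGroupStep (R, cur)), r ≠ [] := by
  induction l with
  | nil =>
    intro R cur hR
    unfold pvFinish
    by_cases hc : cur.isEmpty = true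
    · simpa [hc] using hR
    · have hcur : cur ≠ [] := by simpa [List.isEmpty_iff] using hc
      have hce : cur.isEmpty = false := by simpa [List.isEmpty_iff] using hcur
      simp [hce]
      intro r hr
      rcases hr with hr | hr
      · exact hR r hr
      · subst hr; exact hcur
  | cons x l ih =>
    intro R cur hR
    simp only [List.foldl_cons]
    cases h : cur.getLast? with
    | none => simpa [pvGroupStep, h] using ih R [x] hR
    | some a =>
      have hcur : cur ≠ [] := by intro hc; subst hc; simp at h
      by_cases hx : a + 1 = x
      · simpa [pvGroupStep, h, hx] using ih R (cur ++ [x]) hR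
      · have hR' : ∀ r ∈ R ++ [cur], r ≠ [] := by
          intro r hr
          rcases List.mem_append.mp hr with hr | hr
          · exact hR r hr
          · simp at hr; subst hr; exact hcur
        simpa [pvGroupStep, h, hx] using ih (R ++ [cur]) [x] hR'

-- if no maximal run has length 1, every closed run has length ≥ 2
theorem runs_len2 (l : List Int) : ∀ (R : List (List Int)) (cur : List Int) (a : Int),
    cur ≠ [] → cur.getLast? = some a → pvSingles a (cur.length == 1) l = false →
    (∀ r ∈ R, 2 ≤ r.length) → ∀ r ∈ pvFinish (l.foldl pvGroupStep (R, cur)), 2 ≤ r.length := by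
  induction l with
  | nil =>
    intro R cur a hcur hlast hsing hR
    have h1 : cur.length ≠ 1 := by
      simpa [pvSingles] using hsing
    have h0 : 0 < cur.length := List.length_pos_of_ne_nil hcur
    unfold pvFinish
    have hce : cur.isEmpty = false := by simpa [List.isEmpty_iff] using hcur
    simp [hce]
    intro r hr
    rcases hr with hr | hr
    · exact hR r hr
    · subst hr; omega
  | cons x l ih =>
    intro R cur a hcur hlast hsing hR
    simp only [List.foldl_cons]
    by_cases hx : a + 1 = x
    · have hs : pvSingles x ((cur ++ [x]).length == 1) l = false := by
        have hlf : ((cur ++ [x]).length == 1) = false := by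
          have := List.length_pos_of_ne_nil hcur
          simp; omega
        rw [hlf]
        simpa [pvSingles, hx] using hsing
      simpa [pvGroupStep, hlast, hx] using ih R (cur ++ [x]) x (by simp) (by simp) hs hR
    · have hsing' : (cur.length == 1) = false ∧ pvSingles x true l = false := by
        simp [pvSingles, hx] at hsing
        exact ⟨by simpa using hsing.1, hsing.2⟩
      have hlen2 : 2 ≤ cur.length := by
        have h0 : 0 < cur.length := List.length_pos_of_ne_nil hcur
        have h1 : cur.length ≠ 1 := by simpa using hsing'.1
        omega
      have hR' : ∀ r ∈ R ++ [cur], 2 ≤ r.length := by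
        intro r hr
        rcases List.mem_append.mp hr with hr | hr
        · exact hR r hr
        · simp at hr; subst hr; exact hlen2
      simpa [pvGroupStep, hlast, hx] using ih (R ++ [cur]) [x] x (by simp) (by simp)
        (by simpa using hsing'.2) hR'

-- the filter A's recording applies: runs of length ≥ 2 that are long enough
def pvP (n_slot : Int) (r : List Int) : Bool := decide (2 ≤ r.length) && decide (n_slot ≤ (r.length : Int))

-- MAIN INVARIANT: from any mid-list position i (1 ≤ i ≤ len-2), A's remaining loop appends
-- exactly the pvP-filtered closed runs of the suffix, continuing the current partial run idx
theorem loopA_main (n_slot : Int) (lista : List Int) (h1 : 1 ≤ n_slot) :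
    ∀ (k i : Nat) (idx : List Int) (S : List (List Int)),
      i + k + 2 = lista.length → 1 ≤ i →
      ((idx = [] ∧ pvGetA lista ((i : Int) - 1) + 1 ≠ pvGetA lista i) ∨
       (idx ≠ [] ∧ idx.getLast? = some (pvGetA lista ((i : Int) - 1)) ∧
         pvGetA lista ((i : Int) - 1) + 1 = pvGetA lista i)) →
      ((List.range' i (lista.length - i)).foldl (pvStepA n_slot lista) (idx, S)).2
        = S ++ (pvFinish ((lista.drop i).foldl pvGroupStep ([], idx))).filter (pvP n_slot) := by
  intro k
  induction k with
  | zero =>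
    intro i idx S hlen hi hinv
    simp only [Nat.add_zero] at hlen
    have hi1 : i < lista.length := by omega
    have hi2 : i + 1 < lista.length := by omega
    have g1 : pvGetA lista i = lista[i] := getA_nat lista i hi1
    have g2 : pvGetA lista ((i : Int) + 1) = lista[i + 1] := by
      rw [show ((i : Int) + 1) = ((i + 1 : Nat) : Int) by push_cast; ring]
      exact getA_nat lista (i + 1) hi2
    have hdrop : lista.drop i = [lista[i], lista[i + 1]] := by
      rw [List.drop_eq_getElem_cons hi1, List.drop_eq_getElem_cons hi2,
        List.drop_eq_nil_of_le (by omega)]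
    have hr2 : List.range' i (lista.length - i) = [i, i + 1] := by
      rw [show lista.length - i = 2 by omega]
      simp [List.range'_succ]
    have hc1 : ((i : Int) + 1 < (lista.length : Int)) := by push_cast; omega
    have hc2 : ((i : Int) + 1 = (lista.length : Int) - 1) := by push_cast; omega
    have hc3 : ¬ (((i + 1 : Nat) : Int) + 1 < (lista.length : Int)) := by push_cast; omega
    rw [hr2]
    simp only [List.foldl_cons, List.foldl_nil]
    rw [hdrop]
    by_cases hx : pvGetA lista i + 1 = pvGetA lista ((i : Int) + 1)
    · -- run continues into the last element: early append, then except-flush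
      rw [stepA_ifbranch n_slot lista (idx, S) i hc1 hx, if_pos hc2,
        stepA_except n_slot lista _ (i + 1) hc3]
      rcases hinv with ⟨hidx, _⟩ | ⟨hne, hlast, hcont⟩
      · subst hidx
        rw [show [lista[i], lista[i + 1]].foldl pvGroupStep ([], ([] : List Int))
            = ([], [lista[i], lista[i + 1]]) by simp [pvGroupStep, ← g1, ← g2, hx]]
        simp only [pvFinish, List.isEmpty_cons, Bool.false_eq_true, if_false, List.nil_append,
          List.filter_cons, List.filter_nil]
        by_cases hn : n_slot ≤ (([pvGetA lista i] ++ [pvGetA lista ((i : Int) + 1)]).length : Int)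
        · rw [if_pos hn]
          have : pvP n_slot [lista[i], lista[i + 1]] = true := by
            simp only [List.length_append, List.length_nil, List.length_cons,
              List.length_singleton] at hn ⊢
            simp [pvP]
            push_cast at hn ⊢
            omega
          rw [this]
          simp [← g1, ← g2]
        · rw [if_neg hn]
          have : pvP n_slot [lista[i], lista[i + 1]] = false := by
            simp only [List.length_append, List.length_nil, List.length_cons,
              List.length_singleton] at hn ⊢
            simp [pvP]
            push_cast at hn ⊢
            omega
          rw [this]
          simp
      · rw [show [lista[i], lista[i + 1]].foldl pvGroupStep ([], idx)
            = ([], idx ++ [lista[i]] ++ [lista[i + 1]]) by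
          simp only [List.foldl_cons, List.foldl_nil]
          rw [show pvGroupStep ([], idx) lista[i] = ([], idx ++ [lista[i]]) by
            simp [pvGroupStep, hlast, ← g1, hcont]]
          simp only [pvGroupStep, List.getLast?_append, List.getLast?_singleton]
          rw [g1, g2] at hx
          simp [hx]]
        have hne' : 0 < idx.length := List.length_pos_of_ne_nil hne
        simp only [pvFinish]
        rw [show ((idx ++ [lista[i]] ++ [lista[i + 1]]).isEmpty) = false by simp]
        simp only [Bool.false_eq_true, if_false, List.nil_append, List.filter_cons, List.filter_nil]
        by_cases hn : n_slot ≤ ((idx ++ [pvGetA lista i] ++ [pvGetA lista ((i : Int) + 1)]).length : Int)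
        · rw [if_pos hn]
          have : pvP n_slot (idx ++ [lista[i]] ++ [lista[i + 1]]) = true := by
            simp only [List.length_append, List.length_singleton] at hn ⊢
            simp [pvP]
            push_cast at hn ⊢
            omega
          rw [this]
          simp [← g1, ← g2]
        · rw [if_neg hn]
          have : pvP n_slot (idx ++ [lista[i]] ++ [lista[i + 1]]) = false := by
            simp only [List.length_append, List.length_singleton] at hn ⊢
            simp [pvP]
            push_cast at hn ⊢
            omega
          rw [this]
          simp
    · -- break at i: flush, then the except step never records anything
      rcases hinv with ⟨hidx, hprev⟩ | ⟨hne, hlast, hcont⟩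
      · subst hidx
        have hpc : ¬ (pvGetA lista ((i : Int) - 1) = pvGetA lista i - 1) := by
          intro hcon; exact hprev (by omega)
        rw [stepA_else_fresh n_slot lista ([], S) i hc1 hx hpc]
        rw [if_neg (by simp; omega)]
        rw [stepA_except n_slot lista _ (i + 1) hc3]
        rw [if_neg (by simp; omega)]
        rw [show [lista[i], lista[i + 1]].foldl pvGroupStep ([], ([] : List Int))
            = ([[lista[i]]], [lista[i + 1]]) by
          rw [g1, g2] at hx
          simp [pvGroupStep, hx]]
        simp [pvFinish, pvP]
      · have hpc : pvGetA lista ((i : Int) - 1) = pvGetA lista i - 1 := by omega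
        rw [stepA_else_join n_slot lista (idx, S) i hc1 hx hpc]
        rw [stepA_except n_slot lista _ (i + 1) hc3]
        rw [if_neg (show ¬ (n_slot ≤ ((([] : List Int)).length : Int)) by simp; omega)]
        rw [show [lista[i], lista[i + 1]].foldl pvGroupStep ([], idx)
            = ([idx ++ [lista[i]]], [lista[i + 1]]) by
          simp only [List.foldl_cons, List.foldl_nil]
          rw [show pvGroupStep ([], idx) lista[i] = ([], idx ++ [lista[i]]) by
            simp [pvGroupStep, hlast, ← g1, hcont]]
          simp only [pvGroupStep, List.getLast?_append, List.getLast?_singleton]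
          rw [g1, g2] at hx
          simp [hx]]
        have hne' : 0 < idx.length := List.length_pos_of_ne_nil hne
        simp only [pvFinish]
        rw [show (([lista[i + 1]] : List Int).isEmpty) = false by simp]
        simp only [Bool.false_eq_true, if_false, List.filter_append, List.filter_cons,
          List.filter_nil]
        by_cases hn : n_slot ≤ ((idx ++ [pvGetA lista i]).length : Int)
        · rw [if_pos hn]
          have hP : pvP n_slot (idx ++ [lista[i]]) = true := by
            simp only [List.length_append, List.length_singleton] at hn ⊢
            simp [pvP]
            push_cast at hn ⊢
            omega
          rw [hP]
          have hP1 : pvP n_slot ([lista[i + 1]] : List Int) = false := by simp [pvP]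
          rw [hP1]
          simp [← g1]
        · rw [if_neg hn]
          have hP : pvP n_slot (idx ++ [lista[i]]) = false := by
            simp only [List.length_append, List.length_singleton] at hn ⊢
            simp [pvP]
            push_cast at hn ⊢
            omega
          rw [hP]
          have hP1 : pvP n_slot ([lista[i + 1]] : List Int) = false := by simp [pvP]
          rw [hP1]
          simp
  | succ k ih =>
    intro i idx S hlen hi hinv
    have hi1 : i < lista.length := by omega
    have hi2 : i + 1 < lista.length := by omega
    have g1 : pvGetA lista i = lista[i] := getA_nat lista i hi1
    have g2 : pvGetA lista ((i : Int) + 1) = lista[i + 1] := by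
      rw [show ((i : Int) + 1) = ((i + 1 : Nat) : Int) by push_cast; ring]
      exact getA_nat lista (i + 1) hi2
    have hc1 : ((i : Int) + 1 < (lista.length : Int)) := by push_cast; omega
    have hc2 : ¬ ((i : Int) + 1 = (lista.length : Int) - 1) := by push_cast; omega
    have hcast : pvGetA lista (((i + 1 : Nat) : Int) - 1) = pvGetA lista i :=
      congrArg (pvGetA lista) (by omega)
    have hcast2 : pvGetA lista ((i + 1 : Nat)) = pvGetA lista ((i : Int) + 1) :=
      congrArg (pvGetA lista) (by omega)
    rw [show lista.length - i = (lista.length - (i + 1)) + 1 by omega, List.range'_succ]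
    simp only [List.foldl_cons]
    rw [List.drop_eq_getElem_cons hi1]
    by_cases hx : pvGetA lista i + 1 = pvGetA lista ((i : Int) + 1)
    · -- run continues: extend idx, recurse in the continuing state
      rw [stepA_ifbranch n_slot lista (idx, S) i hc1 hx, if_neg hc2]
      rw [ih (i + 1) (idx ++ [pvGetA lista i]) S (by omega) (by omega)
        (Or.inr ⟨by simp, by simp [hcast], by rw [hcast, hcast2]; exact hx⟩)]
      have hg : pvGroupStep ([], idx) lista[i] = ([], idx ++ [pvGetA lista i]) := by
        rcases hinv with ⟨hidx, _⟩ | ⟨hne, hlast, hcont⟩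
        · subst hidx
          simp [pvGroupStep, g1]
        · simp [pvGroupStep, hlast, ← g1, hcont]
      simp only [List.foldl_cons, hg]
    · -- break at i: flush the finished run, recurse in the fresh state
      have hrecinv : (([] : List Int) = [] ∧
          pvGetA lista (((i + 1 : Nat) : Int) - 1) + 1 ≠ pvGetA lista ((i + 1 : Nat))) ∨
          (([] : List Int) ≠ [] ∧ ([] : List Int).getLast? = some (pvGetA lista (((i + 1 : Nat) : Int) - 1)) ∧
            pvGetA lista (((i + 1 : Nat) : Int) - 1) + 1 = pvGetA lista ((i + 1 : Nat))) :=
        Or.inl ⟨rfl, by rw [hcast, hcast2]; exact hx⟩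
      have hdrop1 : lista.drop (i + 1) = lista[i + 1] :: lista.drop (i + 2) :=
        List.drop_eq_getElem_cons hi2
      rcases hinv with ⟨hidx, hprev⟩ | ⟨hne, hlast, hcont⟩
      · subst hidx
        have hpc : ¬ (pvGetA lista ((i : Int) - 1) = pvGetA lista i - 1) := by
          intro hcon; exact hprev (by omega)
        rw [stepA_else_fresh n_slot lista ([], S) i hc1 hx hpc]
        rw [if_neg (by simp; omega)]
        rw [ih (i + 1) [] S (by omega) (by omega) hrecinv]
        simp only [List.foldl_cons]
        rw [show pvGroupStep ([], ([] : List Int)) lista[i] = ([], [lista[i]]) by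
          simp [pvGroupStep]]
        rw [hdrop1]
        simp only [List.foldl_cons]
        rw [show pvGroupStep (([] : List (List Int)), [lista[i]]) lista[i + 1]
            = ([[lista[i]]], [lista[i + 1]]) by
          rw [g1, g2] at hx
          simp [pvGroupStep, hx]]
        rw [show (([[lista[i]]], [lista[i + 1]]) : List (List Int) × List Int)
            = ([[lista[i]]] ++ [], ([lista[i + 1]] : List Int)) by simp]
        rw [grp_prefix, pvFinish_append]
        rw [show pvGroupStep ([], ([] : List Int)) lista[i + 1] = ([], [lista[i + 1]]) by
          simp [pvGroupStep]]
        simp [pvP]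
      · have hpc : pvGetA lista ((i : Int) - 1) = pvGetA lista i - 1 := by omega
        rw [stepA_else_join n_slot lista (idx, S) i hc1 hx hpc]
        rw [ih (i + 1) [] _ (by omega) (by omega) hrecinv]
        simp only [List.foldl_cons]
        rw [show pvGroupStep ([], idx) lista[i] = ([], idx ++ [lista[i]]) by
          simp [pvGroupStep, hlast, ← g1, hcont]]
        rw [hdrop1]
        simp only [List.foldl_cons]
        rw [show pvGroupStep (([] : List (List Int)), idx ++ [lista[i]]) lista[i + 1]
            = ([idx ++ [lista[i]]], [lista[i + 1]]) by
          simp only [pvGroupStep, List.getLast?_append, List.getLast?_singleton]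
          rw [g1, g2] at hx
          simp [hx]]
        rw [show (([idx ++ [lista[i]]], [lista[i + 1]]) : List (List Int) × List Int)
            = ([idx ++ [lista[i]]] ++ [], ([lista[i + 1]] : List Int)) by simp]
        rw [grp_prefix, pvFinish_append]
        rw [show pvGroupStep ([], ([] : List Int)) lista[i + 1] = ([], [lista[i + 1]]) by
          simp [pvGroupStep]]
        have hne' : 0 < idx.length := List.length_pos_of_ne_nil hne
        simp only [List.filter_append, List.filter_cons, List.filter_nil]
        by_cases hn : n_slot ≤ ((idx ++ [pvGetA lista i]).length : Int)
        · rw [if_pos hn]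
          have hP : pvP n_slot (idx ++ [lista[i]]) = true := by
            simp only [List.length_append, List.length_singleton] at hn ⊢
            simp [pvP]
            push_cast at hn ⊢
            omega
          rw [hP]
          simp [← g1]
        · rw [if_neg hn]
          have hP : pvP n_slot (idx ++ [lista[i]]) = false := by
            simp only [List.length_append, List.length_singleton] at hn ⊢
            simp [pvP]
            push_cast at hn ⊢
            omega
          rw [hP]
          simp

-- B's best-scan only looks at candidates
theorem best_filter (n_slot : Int) (c : List (List Int)) : ∀ (acc : Option (List Int)),
    c.foldl (pvBestStep n_slot) acc
      = (c.filter (fun r => decide (n_slot ≤ (r.length : Int)))).foldl (pvBestStep n_slot) acc := by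
  induction c with
  | nil => intro acc; rfl
  | cons r c ih =>
    intro acc
    by_cases h : n_slot ≤ (r.length : Int)
    · simp only [List.foldl_cons, List.filter_cons, decide_eq_true h, if_pos]
      exact ih _
    · simp only [List.foldl_cons, List.filter_cons, decide_eq_false h]
      simpa [pvBestStep, h] using ih acc

-- a held best of length 1 is never replaced (no nonempty run is strictly shorter)
theorem best_keep_len1 (n_slot : Int) (c : List (List Int)) (b : List Int) (hb : b.length = 1)
    (hne : ∀ r ∈ c, r ≠ []) : c.foldl (pvBestStep n_slot) (some b) = some b := by
  induction c with
  | nil => rfl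
  | cons r c ih =>
    have h0 : 0 < r.length := List.length_pos_of_ne_nil (hne r (by simp))
    have hstep : pvBestStep n_slot (some b) r = some b := by
      unfold pvBestStep
      have : ¬ r.length < b.length := by omega
      simp [this]
    simp only [List.foldl_cons, hstep]
    exact ih (fun r hr => hne r (by simp [hr]))

-- spec of B's best-scan started on a held candidate b over a candidate-only list
theorem best_some (n_slot : Int) : ∀ (c : List (List Int)) (b : List Int),
    (∀ r ∈ c, n_slot ≤ (r.length : Int)) →
    ∃ r, c.foldl (pvBestStep n_slot) (some b) = some r ∧ r.length ≤ b.length ∧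
      (∀ r' ∈ c, r.length ≤ r'.length) ∧
      (r.length < b.length → (r ∈ c ∧ c.find? (fun x => x.length == r.length) = some r)) ∧
      (¬ r.length < b.length → r = b) := by
  intro c
  induction c with
  | nil =>
    intro b _
    exact ⟨b, rfl, le_rfl, by simp, by simp, fun _ => rfl⟩
  | cons x c ih =>
    intro b hQ
    have hQx : n_slot ≤ (x.length : Int) := hQ x (by simp)
    have hQc : ∀ r ∈ c, n_slot ≤ (r.length : Int) := fun r hr => hQ r (by simp [hr])
    by_cases hlt : x.length < b.length
    · -- the held best is replaced by x
      obtain ⟨r, hfold, hle, hall, hfirst, heq⟩ := ih x hQc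
      refine ⟨r, ?_, by omega, ?_, ?_, ?_⟩
      · simpa [pvBestStep, hQx, hlt] using hfold
      · intro r' hr'
        rcases List.mem_cons.mp hr' with hr' | hr'
        · subst hr'; exact hle
        · exact hall r' hr'
      · intro hrb
        by_cases hrx : r.length < x.length
        · obtain ⟨hmem, hfind⟩ := hfirst hrx
          refine ⟨by simp [hmem], ?_⟩
          rw [List.find?_cons_of_neg, hfind]
          simp; omega
        · have hr : r = x := heq hrx
          subst hr
          exact ⟨by simp, by rw [List.find?_cons_of_pos] <;> simp⟩
      · intro hrb
        exfalso
        exact hrb (lt_of_le_of_lt hle hlt)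
    · -- x is not strictly better, the held best stays
      obtain ⟨r, hfold, hle, hall, hfirst, heq⟩ := ih b hQc
      refine ⟨r, ?_, hle, ?_, ?_, heq⟩
      · simpa [pvBestStep, hQx, hlt] using hfold
      · intro r' hr'
        rcases List.mem_cons.mp hr' with hr' | hr'
        · subst hr'; omega
        · exact hall r' hr'
      · intro hrb
        obtain ⟨hmem, hfind⟩ := hfirst hrb
        refine ⟨by simp [hmem], ?_⟩
        rw [List.find?_cons_of_neg, hfind]
        simp; omega

-- A's retry-while returns the first list of minimal length m once k reaches m
theorem while_min (c : List (List Int)) (m : Nat) (w : List Int)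
    (hmin : ∀ r ∈ c, ¬ r.length < m)
    (hfind : c.find? (fun x => (x.length : Int) == (m : Int)) = some w) :
    ∀ (fuel : Nat) (k : Int), k ≤ (m : Int) → (m : Int) - k < (fuel : Int) →
      pvWhileA fuel k c = w := by
  intro fuel
  induction fuel with
  | zero => intro k hk hf; exfalso; simp at hf; omega
  | succ fuel ih =>
    intro k hk hf
    by_cases hkm : k = (m : Int)
    · subst hkm
      simp only [pvWhileA, hfind]
    · have hklt : k < (m : Int) := lt_of_le_of_ne hk hkm
      have hnone : c.find? (fun l => (l.length : Int) == k) = none := by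
        rw [List.find?_eq_none]
        intro x hx
        have := hmin x hx
        simp; omega
      simp only [pvWhileA, hnone]
      exact ih (k + 1) (by omega) (by push_cast at hf ⊢; omega)

-- A's tail (emptiness test + retry-while) equals B's best-scan, on a candidate-only list
theorem final_sel (n_slot : Int) (c : List (List Int))
    (hQ : ∀ r ∈ c, n_slot ≤ (r.length : Int)) :
    (if c.isEmpty then ([] : List Int)
     else pvWhileA ((((c.foldl (fun m r => max m r.length) 0 : Nat) : Int) + 1 - n_slot).toNat + 1) n_slot c)
      = (c.foldl (pvBestStep n_slot) none).getD [] := by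
  cases c with
  | nil => rfl
  | cons r0 c' =>
    have hQ0 : n_slot ≤ (r0.length : Int) := hQ r0 (by simp)
    have hQc : ∀ x ∈ c', n_slot ≤ (x.length : Int) := fun x hx => hQ x (by simp [hx])
    obtain ⟨r, hfold, hle, hall, hfirst, heq⟩ := best_some n_slot c' r0 hQc
    have hrc : r ∈ r0 :: c' := by
      by_cases hlt : r.length < r0.length
      · exact List.mem_cons_of_mem _ (hfirst hlt).1
      · rw [heq hlt]; simp
    have hmin : ∀ x ∈ r0 :: c', ¬ x.length < r.length := by
      intro x hx
      rcases List.mem_cons.mp hx with hx | hx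
      · subst hx; omega
      · have := hall x hx; omega
    have hfind : (r0 :: c').find? (fun x => (x.length : Int) == ((r.length : Nat) : Int)) = some r := by
      have hp : (fun x : List Int => ((x.length : Int) == ((r.length : Nat) : Int)))
          = (fun x : List Int => x.length == r.length) := by
        funext x
        by_cases h : x.length = r.length
        · simp [h]
        · have h' : (x.length : Int) ≠ (r.length : Int) := by exact_mod_cast h
          simp [h, h']
      rw [hp]
      by_cases hlt : r.length < r0.length
      · obtain ⟨hmem, hf⟩ := hfirst hlt
        rw [List.find?_cons_of_neg, hf]
        simp; omega
      · have hrr : r = r0 := heq hlt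
        subst hrr
        rw [List.find?_cons_of_pos] <;> simp
    have hM : r.length ≤ (r0 :: c').foldl (fun m r => max m r.length) 0 :=
      (PySem.List.le_foldl_max_nat (r0 :: c') List.length 0).2 r hrc
    have hnm : n_slot ≤ (r.length : Int) := hQ r hrc
    have hfuel : ((r.length : Nat) : Int) - n_slot <
        (((((r0 :: c').foldl (fun m r => max m r.length) 0 : Nat) : Int) + 1 - n_slot).toNat + 1 : Nat) := by
      have hM' : ((r.length : Nat) : Int) ≤ (((r0 :: c').foldl (fun m r => max m r.length) 0 : Nat) : Int) := by
        exact_mod_cast hM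
      push_cast
      omega
    have hw := while_min (r0 :: c') r.length r hmin hfind
      (((((r0 :: c').foldl (fun m r => max m r.length) 0 : Nat) : Int) + 1 - n_slot).toNat + 1)
      n_slot hnm hfuel
    simp only [List.isEmpty_cons, Bool.false_eq_true, if_false, hw]
    rw [show (r0 :: c').foldl (pvBestStep n_slot) none = c'.foldl (pvBestStep n_slot) (some r0) by
      simp [pvBestStep, hQ0], hfold]
    rfl

-- pvP agrees with B's candidate test once n_slot ≥ 2
theorem pvP_eq_Q (n_slot : Int) (h2 : 2 ≤ n_slot) (r : List Int) :
    pvP n_slot r = decide (n_slot ≤ (r.length : Int)) := by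
  simp only [pvP]
  by_cases hq : n_slot ≤ (r.length : Int)
  · have : 2 ≤ r.length := by omega
    simp [hq, this]
  · simp [hq]

-- A's whole scan, for a list of length ≥ 2, in terms of B's runs
theorem A_sub_eq (n_slot x0 x1 : Int) (rest : List Int) (h1 : 1 ≤ n_slot) :
    ((List.range (x0 :: x1 :: rest).length).foldl (pvStepA n_slot (x0 :: x1 :: rest)) ([], [])).2
      = if x0 + 1 = x1 then (pvRunsOf (x0 :: x1 :: rest)).filter (pvP n_slot)
        else (if (x0 :: x1 :: rest).getLast? = some (x0 - 1) ∧ n_slot ≤ 1 then [[x0]] else [])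
          ++ (pvRunsOf (x1 :: rest)).filter (pvP n_slot) := by
  have g0 : pvGetA (x0 :: x1 :: rest) ((0 : Nat) : Int) = x0 := by
    rw [getA_nat _ 0 (by simp)]; rfl
  have g1 : pvGetA (x0 :: x1 :: rest) (((0 : Nat) : Int) + 1) = x1 := by
    rw [show (((0 : Nat) : Int) + 1) = ((1 : Nat) : Int) by norm_num, getA_nat _ 1 (by simp)]; rfl
  have g0' : pvGetA (x0 :: x1 :: rest) (0 : Int) = x0 := by
    rw [show (0 : Int) = ((0 : Nat) : Int) by norm_num]; exact g0
  have g1' : pvGetA (x0 :: x1 :: rest) (1 : Int) = x1 := by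
    rw [show (1 : Int) = ((0 : Nat) : Int) + 1 by norm_num]; exact g1
  have gm : pvGetA (x0 :: x1 :: rest) (((0 : Nat) : Int) - 1)
      = ((x0 :: x1 :: rest).getLast?).getD 0 := by
    rw [show (((0 : Nat) : Int) - 1) = (-1 : Int) by norm_num]
    simp [pvGetA, PySem.List.pyGet?_neg_one]
  have hgl : ∃ glast, (x0 :: x1 :: rest).getLast? = some glast := by
    cases h : (x0 :: x1 :: rest).getLast? with
    | none => exact absurd (List.getLast?_eq_none_iff.mp h) (by simp)
    | some a => exact ⟨a, rfl⟩
  obtain ⟨glast, hglast⟩ := hgl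
  have hc1 : ((0 : Nat) : Int) + 1 < ((x0 :: x1 :: rest).length : Int) := by
    simp only [List.length_cons]
    push_cast
    omega
  have hruns : pvRunsOf (x0 :: x1 :: rest)
      = pvFinish ((x1 :: rest).foldl pvGroupStep ([], [x0])) := by
    simp [pvRunsOf, pvFinish, pvGroupStep]
  have hruns1 : ∀ (y : Int) (t : List Int), pvRunsOf (y :: t)
      = pvFinish ((t).foldl pvGroupStep ([], [y])) := by
    intro y t
    simp [pvRunsOf, pvFinish, pvGroupStep]
  rw [List.range_eq_range']
  rw [show (x0 :: x1 :: rest).length = ((x0 :: x1 :: rest).length - 1) + 1 by simp, List.range'_succ]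
  simp only [List.foldl_cons]
  by_cases hx0 : x0 + 1 = x1
  · rw [if_pos hx0]
    have hx0' : pvGetA (x0 :: x1 :: rest) ((0 : Nat) : Int) + 1
        = pvGetA (x0 :: x1 :: rest) (((0 : Nat) : Int) + 1) := by rw [g0, g1]; exact hx0
    rw [stepA_ifbranch n_slot _ ([], []) 0 hc1 hx0']
    cases rest with
    | nil =>
      rw [if_pos (show ((0 : Nat) : Int) + 1 = (([x0, x1] : List Int).length : Int) - 1 by simp)]
      rw [show List.range' 1 (([x0, x1] : List Int).length - 1) = [1] by simp [List.range'_succ]]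
      simp only [List.foldl_cons, List.foldl_nil]
      rw [stepA_except n_slot [x0, x1] _ 1 (by simp)]
      rw [hruns]
      have hgrp : ([x1] : List Int).foldl pvGroupStep ([], [x0]) = ([], [x0, x1]) := by
        simp [pvGroupStep, hx0]
      rw [hgrp]
      simp only [pvFinish, List.isEmpty_cons, Bool.false_eq_true, if_false, List.nil_append,
        List.filter_cons, List.filter_nil]
      by_cases hn : n_slot ≤ (([pvGetA [x0, x1] ((0 : Nat) : Int)]
          ++ [pvGetA [x0, x1] (((0 : Nat) : Int) + 1)]).length : Int)
      · rw [if_pos hn]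
        have hP : pvP n_slot [x0, x1] = true := by
          simp only [List.length_append, List.length_nil, List.length_singleton] at hn
          simp [pvP]
          push_cast at hn ⊢
          omega
        rw [hP]
        simp [g0', g1']
      · rw [if_neg hn]
        have hP : pvP n_slot [x0, x1] = false := by
          simp only [List.length_append, List.length_nil, List.length_singleton] at hn
          simp [pvP]
          push_cast at hn ⊢
          omega
        rw [hP]
        simp
    | cons y rest' =>
      rw [if_neg (show ¬ (((0 : Nat) : Int) + 1 = ((x0 :: x1 :: y :: rest').length : Int) - 1) by
        simp only [List.length_cons]; push_cast; omega)]
      rw [show (x0 :: x1 :: y :: rest').length - 1 = (x0 :: x1 :: y :: rest').length - 1 from rfl]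
      rw [loopA_main n_slot (x0 :: x1 :: y :: rest') h1 ((x0 :: x1 :: y :: rest').length - 3) 1
        ([] ++ [pvGetA (x0 :: x1 :: y :: rest') ((0 : Nat) : Int)]) []
        (by simp only [List.length_cons]; omega) (by omega)
        (Or.inr ⟨by simp, by simp [show ((1 : Nat) : Int) - 1 = ((0 : Nat) : Int) by norm_num],
          by rw [show ((1 : Nat) : Int) - 1 = ((0 : Nat) : Int) by norm_num,
            show ((1 : Nat) : Int) = ((0 : Nat) : Int) + 1 by norm_num]; exact hx0'⟩)]
      rw [hruns]
      simp only [List.nil_append, g0, List.drop_succ_cons, List.drop_zero]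
  · rw [if_neg hx0]
    have hx0' : ¬ (pvGetA (x0 :: x1 :: rest) ((0 : Nat) : Int) + 1
        = pvGetA (x0 :: x1 :: rest) (((0 : Nat) : Int) + 1)) := by rw [g0, g1]; exact hx0
    have hfresh : ∀ S₀, ((List.range' 1 ((x0 :: x1 :: rest).length - 1)).foldl
        (pvStepA n_slot (x0 :: x1 :: rest)) ([], S₀)).2
        = S₀ ++ (pvRunsOf (x1 :: rest)).filter (pvP n_slot) := by
      intro S₀
      cases rest with
      | nil =>
        rw [show List.range' 1 (([x0, x1] : List Int).length - 1) = [1] by simp [List.range'_succ]]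
        simp only [List.foldl_cons, List.foldl_nil]
        rw [stepA_except n_slot [x0, x1] _ 1 (by simp)]
        rw [if_neg (show ¬ (n_slot ≤ ((([] : List Int)).length : Int)) by
          simp only [List.length_nil, Nat.cast_zero]; omega)]
        simp [pvRunsOf, pvFinish, pvGroupStep, pvP]
      | cons y rest' =>
        rw [loopA_main n_slot (x0 :: x1 :: y :: rest') h1 ((x0 :: x1 :: y :: rest').length - 3) 1
          [] S₀ (by simp only [List.length_cons]; omega) (by omega)
          (Or.inl ⟨rfl, by rw [show ((1 : Nat) : Int) - 1 = ((0 : Nat) : Int) by norm_num,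
            show ((1 : Nat) : Int) = ((0 : Nat) : Int) + 1 by norm_num]; exact hx0'⟩)]
        rw [hruns1 x1 (y :: rest')]
        simp only [List.drop_succ_cons, List.drop_zero, List.foldl_cons]
        rw [show pvGroupStep ([], ([] : List Int)) x1 = ([], [x1]) by simp [pvGroupStep]]
    by_cases hw : pvGetA (x0 :: x1 :: rest) (((0 : Nat) : Int) - 1)
        = pvGetA (x0 :: x1 :: rest) ((0 : Nat) : Int) - 1
    · -- wraparound fires: the first element is recorded alone
      rw [stepA_else_join n_slot _ ([], []) 0 hc1 hx0' hw]
      rw [hfresh _]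
      congr 1
      have hwl : (x0 :: x1 :: rest).getLast? = some (x0 - 1) := by
        rw [gm, hglast, g0] at hw
        simp at hw
        rw [hglast, hw]
      have hlen1 : ((((([] : List Int), ([] : List (List Int))).1
          ++ [pvGetA (x0 :: x1 :: rest) ((0 : Nat) : Int)]).length : Nat) : Int) = 1 := by
        show ((([] : List Int) ++ [pvGetA (x0 :: x1 :: rest) ((0 : Nat) : Int)]).length : Int) = 1
        simp
      by_cases hn1 : n_slot ≤ 1
      · rw [if_pos (show (x0 :: x1 :: rest).getLast? = some (x0 - 1) ∧ n_slot ≤ 1 from ⟨hwl, hn1⟩)]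
        rw [if_pos (show n_slot ≤ _ by rw [hlen1]; exact hn1)]
        simp [g0']
      · rw [if_neg (show ¬ ((x0 :: x1 :: rest).getLast? = some (x0 - 1) ∧ n_slot ≤ 1) by
          rintro ⟨_, h⟩; exact hn1 h)]
        rw [if_neg (show ¬ n_slot ≤ _ by rw [hlen1]; exact hn1)]
    · -- no wraparound: nothing is recorded at position 0
      rw [stepA_else_fresh n_slot _ ([], []) 0 hc1 hx0' hw]
      rw [if_neg (show ¬ (n_slot ≤ ((([] : List Int)).length : Int)) by
        simp only [List.length_nil, Nat.cast_zero]; omega)]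
      rw [hfresh _]
      have hwl : ¬ ((x0 :: x1 :: rest).getLast? = some (x0 - 1) ∧ n_slot ≤ 1) := by
        rintro ⟨hl, _⟩
        apply hw
        rw [gm, hglast, g0]
        rw [hglast] at hl
        simp at hl
        simp [hl]
      rw [if_neg hwl]

-- the common tail: once A's recorded sublist IS B's candidate list, the programs agree
theorem assemble (n_slot : Int) (lista : List Int)
    (hsub : ((List.range lista.length).foldl (pvStepA n_slot lista) ([], [])).2
      = (pvRunsOf lista).filter (fun r => decide (n_slot ≤ (r.length : Int)))) :
    checkSlotsBestGap n_slot lista = checkSlotsBestGap_alt n_slot lista := by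
  unfold checkSlotsBestGap checkSlotsBestGap_alt
  simp only [hsub]
  rw [final_sel n_slot _ (fun r hr => of_decide_eq_true (List.mem_filter.mp hr).2)]
  rw [← best_filter]

-- recorded runs are a passive prefix of the finished grouping
theorem finish_prefix (l : List Int) (R : List (List Int)) (cur : List Int) :
    pvFinish (l.foldl pvGroupStep (R, cur)) = R ++ pvFinish (l.foldl pvGroupStep ([], cur)) := by
  rw [show (l.foldl pvGroupStep (R, cur))
      = (R ++ (l.foldl pvGroupStep ([], cur)).1, (l.foldl pvGroupStep ([], cur)).2) from by
    simpa using grp_prefix l R [] cur]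
  rw [pvFinish_append]

-- an isolated index yields a length-1 run for the scanner
theorem singles_of_iso : ∀ (r : List Int) (a : Int) (len1 : Bool),
    (∃ i, i < (a :: r).length ∧
      (i ≠ 0 → (a :: r).getD (i - 1) 0 + 1 ≠ (a :: r).getD i 0) ∧
      (i = (a :: r).length - 1 ∨ (a :: r).getD i 0 + 1 ≠ (a :: r).getD (i + 1) 0) ∧
      (i = 0 → len1 = true)) →
    pvSingles a len1 r = true := by
  intro r
  induction r with
  | nil =>
    rintro a len1 ⟨i, hi, _, _, h0⟩
    have hi0 : i = 0 := by simp at hi; omega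
    simpa [pvSingles] using h0 hi0
  | cons x r' ih =>
    rintro a len1 ⟨i, hi, hlft, hrt, h0⟩
    by_cases hax : a + 1 = x
    · have hi0 : i ≠ 0 := by
        rintro rfl
        rcases hrt with h | h
        · simp at h
        · exact absurd hax (by simpa using h)
      have hi1 : i ≠ 1 := by
        rintro rfl
        exact absurd hax (by simpa using hlft one_ne_zero)
      obtain ⟨j, rfl⟩ : ∃ j, i = j + 2 := ⟨i - 2, by omega⟩
      rw [show pvSingles a len1 (x :: r') = pvSingles x false r' by simp [pvSingles, hax]]
      apply ih
      refine ⟨j + 1, by simp at hi ⊢; omega, ?_, ?_, fun h => absurd h (by omega)⟩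
      · intro _
        simpa [List.getD_cons_succ] using hlft (by omega)
      · rcases hrt with h | h
        · exact Or.inl (by simp at h ⊢; omega)
        · exact Or.inr (by simpa [List.getD_cons_succ] using h)
    · rw [show pvSingles a len1 (x :: r') = (len1 || pvSingles x true r') by simp [pvSingles, hax]]
      by_cases hi0 : i = 0
      · subst hi0
        rw [h0 rfl]
        simp
      · have hrec : pvSingles x true r' = true := by
          apply ih
          obtain ⟨j, rfl⟩ : ∃ j, i = j + 1 := ⟨i - 1, by omega⟩
          refine ⟨j, by simp at hi ⊢; omega, ?_, ?_, fun _ => rfl⟩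
          · intro hj0
            obtain ⟨m, rfl⟩ : ∃ m, j = m + 1 := ⟨j - 1, by omega⟩
            simpa [List.getD_cons_succ] using hlft (by omega)
          · rcases hrt with h | h
            · exact Or.inl (by simp at h ⊢; omega)
            · exact Or.inr (by simpa [List.getD_cons_succ] using h)
        simp [hrec]

-- a length-1 run found by the scanner survives into the finished grouping
theorem singles_run1 : ∀ (l : List Int) (R : List (List Int)) (cur : List Int) (a : Int),
    cur ≠ [] → cur.getLast? = some a → pvSingles a (cur.length == 1) l = true →
    ∃ r ∈ pvFinish (l.foldl pvGroupStep (R, cur)), r.length = 1 := by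
  intro l
  induction l with
  | nil =>
    intro R cur a hcur hlast h
    have h1 : cur.length = 1 := by simpa [pvSingles] using h
    have hce : cur.isEmpty = false := by simpa [List.isEmpty_iff] using hcur
    exact ⟨cur, by simp [pvFinish, hce], h1⟩
  | cons x l ih =>
    intro R cur a hcur hlast h
    simp only [List.foldl_cons]
    by_cases hax : a + 1 = x
    · have h' : pvSingles x ((cur ++ [x]).length == 1) l = true := by
        have hlf : ((cur ++ [x]).length == 1) = false := by
          have := List.length_pos_of_ne_nil hcur
          simp; omega
        rw [hlf]
        simpa [pvSingles, hax] using h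
      simpa [pvGroupStep, hlast, hax] using ih R (cur ++ [x]) x (by simp) (by simp) h'
    · have h2 : cur.length = 1 ∨ pvSingles x true l = true := by
        have := h
        simp [pvSingles, hax] at this
        rcases this with h2 | h2
        · exact Or.inl (by simpa using h2)
        · exact Or.inr h2
      rcases h2 with h2 | h2
      · refine ⟨cur, ?_, h2⟩
        rw [show pvGroupStep (R, cur) x = (R ++ [cur], [x]) by simp [pvGroupStep, hlast, hax]]
        rw [finish_prefix]
        simp
      · have hrec := ih (R ++ [cur]) [x] x (by simp) (by simp) (by simpa using h2)
        simpa [pvGroupStep, hlast, hax] using hrec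

-- A's retry loop returns [] or an element of the recorded list
theorem whileA_mem : ∀ (fuel : Nat) (k : Int) (c : List (List Int)),
    pvWhileA fuel k c = [] ∨ pvWhileA fuel k c ∈ c := by
  intro fuel
  induction fuel with
  | zero => intro k c; left; rfl
  | succ fuel ih =>
    intro k c
    simp only [pvWhileA]
    cases h : c.find? (fun l => (l.length : Int) == k) with
    | none => exact ih (k + 1) c
    | some r => exact Or.inr (List.mem_of_find?_eq_some h)

-- with a length-1 run present, B's min-scan (n_slot = 1) returns a length-1 run
theorem B_min_len1 (runs : List (List Int)) (hnn : ∀ r ∈ runs, r ≠ [])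
    (h1 : ∃ r ∈ runs, r.length = 1) :
    ∃ r, runs.foldl (pvBestStep 1) none = some r ∧ r.length = 1 := by
  cases runs with
  | nil => simp at h1
  | cons r0 rs =>
    have hr0 : 0 < r0.length := List.length_pos_of_ne_nil (hnn r0 (by simp))
    have hQ : ∀ r ∈ rs, (1 : Int) ≤ (r.length : Int) := by
      intro r hr
      have := List.length_pos_of_ne_nil (hnn r (by simp [hr]))
      exact_mod_cast this
    obtain ⟨r, hfold, hle, hall, hfirst, heq⟩ := best_some 1 rs r0 hQ
    refine ⟨r, ?_, ?_⟩
    · simp only [List.foldl_cons]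
      rw [show pvBestStep 1 none r0 = some r0 by
        simp only [pvBestStep]
        rw [if_pos (by exact_mod_cast hr0)]]
      exact hfold
    · have hge : 1 ≤ r.length := by
        by_cases hlt : r.length < r0.length
        · exact List.length_pos_of_ne_nil (hnn r (by simp [(hfirst hlt).1]))
        · rw [heq hlt]; omega
      obtain ⟨s, hs, hs1⟩ := h1
      have hle1 : r.length ≤ 1 := by
        rcases List.mem_cons.mp hs with rfl | hs
        · omega
        · have := hall s hs; omega
      omega

-- A's value is [] or one of its recorded candidate runs
theorem A_shape (n_slot : Int) (lista : List Int) :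
    checkSlotsBestGap n_slot lista = [] ∨
      checkSlotsBestGap n_slot lista
        ∈ ((List.range lista.length).foldl (pvStepA n_slot lista) ([], [])).2 := by
  have hdef : checkSlotsBestGap n_slot lista
      = (if (((List.range lista.length).foldl (pvStepA n_slot lista) ([], [])).2).isEmpty
         then ([] : List Int)
         else pvWhileA (((((((List.range lista.length).foldl (pvStepA n_slot lista) ([], [])).2).foldl
              (fun m r => max m r.length) 0 : Nat) : Int) + 1 - n_slot).toNat + 1) n_slot
            (((List.range lista.length).foldl (pvStepA n_slot lista) ([], [])).2)) := rfl
  rw [hdef]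
  by_cases h : (((List.range lista.length).foldl (pvStepA n_slot lista) ([], [])).2).isEmpty
  · rw [if_pos h]; exact Or.inl rfl
  · rw [if_neg h]; exact whileA_mem _ n_slot _

-- ===== VERDICT =====
theorem checkSlotsBestGap_spec : Claim_unchanged_checkSlotsBestGap := by
  intro n_slot lista _ hpre
  unfold Spec_checkSlotsBestGap
  intro hnd
  have h1 : 1 ≤ n_slot := hpre
  cases lista with
  | nil => rfl
  | cons x0 tl =>
    cases tl with
    | nil =>
      rcases (show n_slot = 1 ∨ 2 ≤ n_slot by omega) with hn | hn
      · exact absurd ⟨hn, by simp, ⟨0, by simp⟩⟩ hnd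
      · have hA : checkSlotsBestGap n_slot [x0] = [] := by
          unfold checkSlotsBestGap
          rw [show ([x0] : List Int).length = 1 by simp, List.range_one]
          simp only [List.foldl_cons, List.foldl_nil]
          rw [stepA_except n_slot [x0] _ 0 (by simp)]
          rw [if_neg (show ¬ (n_slot ≤ ((([] : List Int)).length : Int)) by
            simp only [List.length_nil, Nat.cast_zero]; omega)]
          rfl
        have hB : checkSlotsBestGap_alt n_slot [x0] = [] := by
          unfold checkSlotsBestGap_alt
          rw [show pvRunsOf [x0] = [[x0]] by simp [pvRunsOf, pvGroupStep]]
          simp only [List.foldl_cons, List.foldl_nil]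
          rw [show pvBestStep n_slot none [x0] = none by
            simp only [pvBestStep, List.length_singleton]
            rw [if_neg (by push_cast; omega)]]
          rfl
        rw [hA, hB]
    | cons x1 rest =>
      by_cases hn2 : 2 ≤ n_slot
      · apply assemble
        rw [A_sub_eq n_slot x0 x1 rest h1]
        by_cases hx0 : x0 + 1 = x1
        · rw [if_pos hx0, List.filter_congr (fun r _ => pvP_eq_Q n_slot hn2 r)]
        · rw [if_neg hx0, if_neg (by rintro ⟨_, h⟩; omega)]
          rw [runsOf_break x0 x1 rest hx0, List.filter_cons]
          rw [if_neg (show ¬ ((decide (n_slot ≤ ((([x0] : List Int)).length : Int))) = true) by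
            simp only [List.length_singleton, decide_eq_true_eq, Nat.cast_one]; omega)]
          simp only [List.nil_append]
          rw [List.filter_congr (fun r _ => pvP_eq_Q n_slot hn2 r)]
      · have hn1 : n_slot = 1 := by omega
        subst hn1
        by_cases hwrap : (x0 :: x1 :: rest).getLast? = some (x0 - 1) ∧ ¬ (x0 + 1 = x1)
        · -- wraparound head with a 1-slot request: both sides return [x0]
          have hgl : (x0 :: x1 :: rest).getLast? = some (x0 - 1) := hwrap.1
          have hx0 : ¬ (x0 + 1 = x1) := hwrap.2
          have hfilt2 : ∀ r ∈ (pvRunsOf (x1 :: rest)).filter (pvP 1), r ≠ [] := by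
            intro r hr
            have := (List.mem_filter.mp hr).2
            simp only [pvP, Bool.and_eq_true, decide_eq_true_eq] at this
            exact List.ne_nil_of_length_pos (by omega)
          have hA : checkSlotsBestGap 1 (x0 :: x1 :: rest) = [x0] := by
            unfold checkSlotsBestGap
            simp only [A_sub_eq 1 x0 x1 rest (le_refl 1), if_neg hx0,
              if_pos (show (x0 :: x1 :: rest).getLast? = some (x0 - 1) ∧ (1 : Int) ≤ 1 from ⟨hgl, le_refl 1⟩)]
            rw [final_sel 1 _ (by
              intro r hr
              rcases List.mem_append.mp hr with hr | hr
              · simp at hr; subst hr; simp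
              · have := (List.mem_filter.mp hr).2
                simp only [pvP, Bool.and_eq_true, decide_eq_true_eq] at this
                omega)]
            simp only [List.cons_append, List.nil_append, List.foldl_cons]
            rw [show pvBestStep 1 none [x0] = some [x0] by simp [pvBestStep]]
            rw [best_keep_len1 1 _ [x0] (by simp) hfilt2]
            rfl
          have hB : checkSlotsBestGap_alt 1 (x0 :: x1 :: rest) = [x0] := by
            unfold checkSlotsBestGap_alt
            rw [runsOf_break x0 x1 rest hx0]
            simp only [List.foldl_cons]
            rw [show pvBestStep 1 none [x0] = some [x0] by simp [pvBestStep]]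
            rw [best_keep_len1 1 _ [x0] (by simp) (by
              rw [show pvRunsOf (x1 :: rest) = pvFinish (rest.foldl pvGroupStep ([], [x1])) by
                simp [pvRunsOf, pvFinish, pvGroupStep]]
              exact runs_ne_nil rest [] [x1] (by simp))]
            rfl
          rw [hA, hB]
        · -- no wraparound and a 1-slot request: ¬D_ forces every run to have length ≥ 2
          have hnw : ¬ ((x0 :: x1 :: rest).getLast? = some ((x0 :: x1 :: rest).getD 0 0 - 1) ∧
              (x0 :: x1 :: rest).getD 0 0 + 1 ≠ (x0 :: x1 :: rest).getD 1 0 ∧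
              2 ≤ (x0 :: x1 :: rest).length) := by
            rintro ⟨hg, hne, -⟩
            exact hwrap ⟨by simpa using hg, by simpa using hne⟩
          have hs : ¬ ∃ i < (x0 :: x1 :: rest).length,
              (i = 0 ∨ (x0 :: x1 :: rest).getD (i - 1) 0 + 1 ≠ (x0 :: x1 :: rest).getD i 0) ∧
              (i = (x0 :: x1 :: rest).length - 1 ∨
                (x0 :: x1 :: rest).getD i 0 + 1 ≠ (x0 :: x1 :: rest).getD (i + 1) 0) := by
            intro hex
            exact hnd ⟨rfl, hnw, hex⟩
          have hx0 : x0 + 1 = x1 := by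
            by_contra hne
            exact hs ⟨0, by simp, Or.inl rfl, Or.inr (by simpa using hne)⟩
          have hsing : pvSingles x0 true (x1 :: rest) = false := by
            by_cases h : pvSingles x0 true (x1 :: rest) = true
            · exfalso
              obtain ⟨i, hi, hl, hr⟩ := singles_to_iso (x1 :: rest) x0 true h
              refine hs ⟨i, hi, ?_, hr⟩
              rcases hl with ⟨h0, _⟩ | ⟨_, hbr⟩
              · exact Or.inl h0
              · exact Or.inr hbr
            · simpa using h
          have h2 : ∀ r ∈ pvRunsOf (x0 :: x1 :: rest), 2 ≤ r.length := by
            rw [show pvRunsOf (x0 :: x1 :: rest)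
              = pvFinish ((x1 :: rest).foldl pvGroupStep ([], [x0])) by
              simp [pvRunsOf, pvFinish, pvGroupStep]]
            exact runs_len2 (x1 :: rest) [] [x0] x0 (by simp) (by simp)
              (by simpa using hsing) (by simp)
          apply assemble
          rw [A_sub_eq 1 x0 x1 rest (le_refl 1), if_pos hx0]
          exact List.filter_congr (fun r hr => by
            have := h2 r hr
            simp [pvP]
            omega)

theorem checkSlotsBestGap_changed : Claim_changed_checkSlotsBestGap := by
  unfold Claim_changed_checkSlotsBestGap; decide

theorem checkSlotsBestGap_tight : Claim_exact_checkSlotsBestGap := by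
  intro n_slot lista _ _ hd
  obtain ⟨hn1, hnw, i, hi, hil, hir⟩ := hd
  subst hn1
  cases lista with
  | nil => simp at hi
  | cons x0 tl =>
    cases tl with
    | nil =>
      have hA : checkSlotsBestGap 1 [x0] = [] := by
        unfold checkSlotsBestGap
        rw [show ([x0] : List Int).length = 1 by simp, List.range_one]
        simp only [List.foldl_cons, List.foldl_nil]
        rw [stepA_except 1 [x0] _ 0 (by simp)]
        rw [if_neg (show ¬ ((1 : Int) ≤ ((([] : List Int)).length : Int)) by simp)]
        rfl
      have hB : checkSlotsBestGap_alt 1 [x0] = [x0] := by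
        unfold checkSlotsBestGap_alt
        rw [show pvRunsOf [x0] = [[x0]] by simp [pvRunsOf, pvGroupStep]]
        simp [pvBestStep]
      rw [hA, hB]
      simp
    | cons x1 rest =>
      have hfin : pvRunsOf (x0 :: x1 :: rest)
          = pvFinish ((x1 :: rest).foldl pvGroupStep ([], [x0])) := by
        simp [pvRunsOf, pvFinish, pvGroupStep]
      have hsingles : pvSingles x0 true (x1 :: rest) = true := by
        apply singles_of_iso
        refine ⟨i, hi, ?_, hir, fun _ => rfl⟩
        intro hi0
        rcases hil with h | h
        · exact absurd h hi0
        · exact h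
      have hrun1 : ∃ r ∈ pvRunsOf (x0 :: x1 :: rest), r.length = 1 := by
        rw [hfin]
        exact singles_run1 (x1 :: rest) [] [x0] x0 (by simp) (by simp) (by simpa using hsingles)
      have hrnn : ∀ r ∈ pvRunsOf (x0 :: x1 :: rest), r ≠ [] := by
        rw [hfin]
        exact runs_ne_nil (x1 :: rest) [] [x0] (by simp)
      obtain ⟨rB, hBfold, hB1⟩ := B_min_len1 _ hrnn hrun1
      have hBval : checkSlotsBestGap_alt 1 (x0 :: x1 :: rest) = rB := by
        unfold checkSlotsBestGap_alt
        rw [hBfold]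
        rfl
      have hsub2 : ∀ r ∈ ((List.range (x0 :: x1 :: rest).length).foldl
          (pvStepA 1 (x0 :: x1 :: rest)) ([], [])).2, 2 ≤ r.length := by
        rw [A_sub_eq 1 x0 x1 rest (le_refl 1)]
        by_cases hx0 : x0 + 1 = x1
        · rw [if_pos hx0]
          intro r hr
          have hp := (List.mem_filter.mp hr).2
          simp only [pvP, Bool.and_eq_true, decide_eq_true_eq] at hp
          exact hp.1
        · rw [if_neg hx0]
          have hwl : ¬ ((x0 :: x1 :: rest).getLast? = some (x0 - 1) ∧ (1 : Int) ≤ 1) := by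
            rintro ⟨hg, -⟩
            exact hnw ⟨by simpa using hg, by simpa using hx0, by simp⟩
          rw [if_neg hwl]
          simp only [List.nil_append]
          intro r hr
          have hp := (List.mem_filter.mp hr).2
          simp only [pvP, Bool.and_eq_true, decide_eq_true_eq] at hp
          exact hp.1
      intro heq
      have hAlen : (checkSlotsBestGap 1 (x0 :: x1 :: rest)).length ≠ 1 := by
        rcases A_shape 1 (x0 :: x1 :: rest) with h | h
        · rw [h]; simp
        · have := hsub2 _ h
          omega
      exact hAlen (by rw [heq, hBval, hB1])
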